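-- pv_equiv track=rewrite | github.com/moumenalaoui/bias2 | extraction/scripts/snippet_packer.py | with_neighbors
-- ===== SOURCE A (Python) =====
-- from typing import Any, Dict, List, Optional, Tuple, Iterable, Set
--
-- def with_neighbors(hit_pids: Set[int], order: List[int], neighbors: int) -> List[int]:
--     if neighbors <= 0:
--         return sorted(hit_pids)
--     idx_of = {pid: i for i, pid in enumerate(order)}
--     expanded: Set[int] = set()
--     for pid in hit_pids:
--         i = idx_of.get(pid)
--         if i is None:
--             continue
--         lo = max(0, i - neighbors)
--         hi = min(len(order) - 1, i + neighbors)
--         for j in range(lo, hi + 1):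
--             expanded.add(order[j])
--     return sorted(expanded)
-- ===== SOURCE B (Python) =====
-- def with_neighbors(hit_pids, order, neighbors):
--     # Sweep merged windows over sorted hit indices: each position of `order`
--     # is visited at most once, instead of once per overlapping hit window.
--     if neighbors <= 0:
--         return sorted(hit_pids)
--     idx_of = {pid: i for i, pid in enumerate(order)}
--     n = len(order)
--     idxs = sorted({idx_of[p] for p in hit_pids if p in idx_of})
--     expanded = set()
--     last = -1
--     for i in idxs:
--         lo = max(i - neighbors, last + 1, 0)
--         hi = min(i + neighbors, n - 1)
--         for j in range(lo, hi + 1):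
--             expanded.add(order[j])
--         last = max(last, hi)
--     return sorted(expanded)
-- ===== Notes on version B (the rewrite author's own statement) =====
-- stated objective: faster
-- what changed: Instead of expanding a +/-neighbors window around every hit independently (touching overlapping positions once per hit), B sorts the distinct hit indices and sweeps once, starting each window after the furthest position already covered, so each position of `order` is visited at most once.
import Mathlib
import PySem

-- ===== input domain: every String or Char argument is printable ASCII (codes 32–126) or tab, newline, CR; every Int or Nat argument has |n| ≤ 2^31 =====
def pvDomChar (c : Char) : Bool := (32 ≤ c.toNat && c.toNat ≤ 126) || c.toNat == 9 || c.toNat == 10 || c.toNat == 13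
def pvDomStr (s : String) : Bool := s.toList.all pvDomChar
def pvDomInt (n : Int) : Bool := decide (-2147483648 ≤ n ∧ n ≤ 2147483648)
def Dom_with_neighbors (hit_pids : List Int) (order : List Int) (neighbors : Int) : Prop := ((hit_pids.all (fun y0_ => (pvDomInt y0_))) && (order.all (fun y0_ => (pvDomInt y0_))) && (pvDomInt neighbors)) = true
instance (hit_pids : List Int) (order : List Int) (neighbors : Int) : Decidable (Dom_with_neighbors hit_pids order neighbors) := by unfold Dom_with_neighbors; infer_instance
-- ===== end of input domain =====

-- B replaces A's per-hit window expansion by a single sweep over merged windows of the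
-- sorted hit indices, so every position of `order` is visited at most once (objective: faster).


-- ===== PORT A =====
-- idx_of = {pid: i for i, pid in enumerate(order)}   (shared by both Pythons verbatim)
def pvIdxOf (order : List Int) : PySem.Dict Int Int :=
  (PySem.List.enumerate order).foldl (fun d p => d.insert p.2 p.1) PySem.Dict.empty

-- for j in range(lo, hi + 1): expanded.add(order[j])   (identical inner loop in both Pythons;
-- order[j] is exact as pyGetD: every j produced by the range satisfies 0 ≤ lo ≤ j ≤ hi ≤ len-1)
def pvAddRange (order : List Int) (lo hi : Int) (s : PySem.Set Int) : PySem.Set Int :=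
  (PySem.List.pyRange lo (hi + 1) 1).foldl
    (fun s j => PySem.Set.add s (PySem.List.pyGetD order j 0)) s

-- one iteration of A's `for pid in hit_pids` loop
def pvAStep (order : List Int) (neighbors : Int) (idx_of : PySem.Dict Int Int)
    (s : PySem.Set Int) (pid : Int) : PySem.Set Int :=
  match idx_of.get? pid with
  | none => s
  | some i =>
      pvAddRange order (max 0 (i - neighbors)) (min ((order.length : Int) - 1) (i + neighbors)) s

def with_neighbors (hit_pids : List Int) (order : List Int) (neighbors : Int) : List Int :=
  if neighbors ≤ 0 then PySem.List.sorted hit_pids (fun x => x) false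
  else
    let idx_of := pvIdxOf order
    let expanded := hit_pids.foldl (pvAStep order neighbors idx_of) PySem.Set.empty
    PySem.List.sorted expanded (fun x => x) false

-- ===== PORT B =====
-- idxs_set = {idx_of[p] for p in hit_pids if p in idx_of}
def pvHitIdxs (hit_pids : List Int) (idx_of : PySem.Dict Int Int) : PySem.Set Int :=
  hit_pids.foldl
    (fun s p => match idx_of.get? p with
      | some i => PySem.Set.add s i
      | none => s) PySem.Set.empty

-- one iteration of B's sweep loop over the sorted hit indices, state = (expanded, last)
def pvSweepStep (order : List Int) (neighbors : Int)
    (st : PySem.Set Int × Int) (i : Int) : PySem.Set Int × Int :=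
  let lo := max (max (i - neighbors) (st.2 + 1)) 0
  let hi := min (i + neighbors) ((order.length : Int) - 1)
  (pvAddRange order lo hi st.1, max st.2 hi)

def with_neighbors_alt (hit_pids : List Int) (order : List Int) (neighbors : Int) : List Int :=
  if neighbors ≤ 0 then PySem.List.sorted hit_pids (fun x => x) false
  else
    let idx_of := pvIdxOf order
    let idxs := PySem.List.sorted (pvHitIdxs hit_pids idx_of) (fun x => x) false
    let fin := idxs.foldl (pvSweepStep order neighbors) (PySem.Set.empty, -1)
    PySem.List.sorted fin.1 (fun x => x) false

-- ===== PRECONDITION & SPEC =====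
def Spec_with_neighbors (hit_pids : List Int) (order : List Int) (neighbors : Int) (out : List Int) : Prop := out = with_neighbors_alt hit_pids order neighbors
instance (hit_pids : List Int) (order : List Int) (neighbors : Int) (out : List Int) : Decidable (Spec_with_neighbors hit_pids order neighbors out) := by unfold Spec_with_neighbors; infer_instance

-- ===== CLAIM (what is proved, stated in full; the proofs are below) =====
def Claim_equal_with_neighbors : Prop := ∀ (hit_pids : List Int) (order : List Int) (neighbors : Int), Dom_with_neighbors hit_pids order neighbors → Spec_with_neighbors hit_pids order neighbors (with_neighbors hit_pids order neighbors)

-- ===== LEMMAS AND PROOFS =====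

theorem mem_pvAddRange (order : List Int) (lo hi : Int) (s : PySem.Set Int) (x : Int) :
    x ∈ pvAddRange order lo hi s ↔
      x ∈ s ∨ ∃ j, lo ≤ j ∧ j < hi + 1 ∧ PySem.List.pyGetD order j 0 = x := by
  unfold pvAddRange
  rw [PySem.Set.mem_foldl_add]
  simp [PySem.List.mem_pyRange_one, eq_comm, and_assoc]

theorem nodup_foldl_add {β : Type} (l : List β) (f : β → Int) (s : PySem.Set Int)
    (h : s.Nodup) : (l.foldl (fun s b => PySem.Set.add s (f b)) s).Nodup := by
  induction l generalizing s with
  | nil => exact h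
  | cons b t ih => exact ih _ (PySem.Set.nodup_add _ _ h)

theorem nodup_pvAddRange (order : List Int) (lo hi : Int) (s : PySem.Set Int)
    (h : s.Nodup) : (pvAddRange order lo hi s).Nodup :=
  nodup_foldl_add _ _ _ h

theorem mem_foldl_pvAStep (order : List Int) (nb : Int) (idx_of : PySem.Dict Int Int)
    (l : List Int) (s : PySem.Set Int) (x : Int) :
    x ∈ l.foldl (pvAStep order nb idx_of) s ↔
      x ∈ s ∨ ∃ p ∈ l, ∃ i, idx_of.get? p = some i ∧
        ∃ j, max 0 (i - nb) ≤ j ∧ j < min ((order.length : Int) - 1) (i + nb) + 1 ∧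
          PySem.List.pyGetD order j 0 = x := by
  induction l generalizing s with
  | nil => simp
  | cons p t ih =>
    rw [List.foldl_cons, ih]
    unfold pvAStep
    cases hg : idx_of.get? p with
    | none =>
      simp only [List.mem_cons]
      constructor
      · rintro (hs | ⟨q, hq, rest⟩)
        · exact Or.inl hs
        · exact Or.inr ⟨q, Or.inr hq, rest⟩
      · rintro (hs | ⟨q, hq | hq, i, hi, rest⟩)
        · exact Or.inl hs
        · subst hq; rw [hg] at hi; exact absurd hi (by simp)
        · exact Or.inr ⟨q, hq, i, hi, rest⟩
    | some i =>
      rw [mem_pvAddRange]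
      simp only [List.mem_cons]
      constructor
      · rintro ((hs | ⟨j, h1, h2, h3⟩) | ⟨q, hq, rest⟩)
        · exact Or.inl hs
        · exact Or.inr ⟨p, Or.inl rfl, i, hg, j, h1, h2, h3⟩
        · exact Or.inr ⟨q, Or.inr hq, rest⟩
      · rintro (hs | ⟨q, hq | hq, i', hi', rest⟩)
        · exact Or.inl (Or.inl hs)
        · subst hq; rw [hg] at hi'
          exact Or.inl (Or.inr (by injection hi' with h; subst h; exact rest))
        · exact Or.inr ⟨q, hq, i', hi', rest⟩

theorem nodup_foldl_pvAStep (order : List Int) (nb : Int) (idx_of : PySem.Dict Int Int)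
    (l : List Int) (s : PySem.Set Int) (h : s.Nodup) :
    (l.foldl (pvAStep order nb idx_of) s).Nodup := by
  induction l generalizing s with
  | nil => exact h
  | cons p t ih =>
    rw [List.foldl_cons]
    apply ih
    unfold pvAStep
    cases idx_of.get? p with
    | none => exact h
    | some i => exact nodup_pvAddRange _ _ _ _ h

theorem mem_pvHitIdxs_fold (idx_of : PySem.Dict Int Int) (l : List Int)
    (s : PySem.Set Int) (x : Int) :
    x ∈ l.foldl
        (fun s p => match idx_of.get? p with
          | some i => PySem.Set.add s i
          | none => s) s ↔
      x ∈ s ∨ ∃ p ∈ l, idx_of.get? p = some x := by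
  induction l generalizing s with
  | nil => simp
  | cons p t ih =>
    rw [List.foldl_cons, ih]
    cases hg : idx_of.get? p with
    | none =>
      simp only [List.mem_cons]
      constructor
      · rintro (hs | ⟨q, hq, hqx⟩)
        · exact Or.inl hs
        · exact Or.inr ⟨q, Or.inr hq, hqx⟩
      · rintro (hs | ⟨q, hq | hq, hqx⟩)
        · exact Or.inl hs
        · subst hq; rw [hg] at hqx; exact absurd hqx (by simp)
        · exact Or.inr ⟨q, hq, hqx⟩
    | some i =>
      rw [PySem.Set.mem_add]
      simp only [List.mem_cons]
      constructor
      · rintro ((hs | hs) | ⟨q, hq, hqx⟩)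
        · exact Or.inl hs
        · exact Or.inr ⟨p, Or.inl rfl, by rw [hg, hs]⟩
        · exact Or.inr ⟨q, Or.inr hq, hqx⟩
      · rintro (hs | ⟨q, hq | hq, hqx⟩)
        · exact Or.inl (Or.inl hs)
        · subst hq; rw [hg] at hqx
          exact Or.inl (Or.inr (by injection hqx with h; exact h.symm))
        · exact Or.inr ⟨q, hq, hqx⟩

theorem nodup_foldl_pvSweepStep (order : List Int) (nb : Int) (idxs : List Int)
    (s : PySem.Set Int) (last : Int) (h : s.Nodup) :
    ((idxs.foldl (pvSweepStep order nb) (s, last)).1).Nodup := by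
  induction idxs generalizing s last with
  | nil => exact h
  | cons i t ih =>
    rw [List.foldl_cons]
    exact ih _ _ (nodup_pvAddRange _ _ _ _ h)

theorem pvSweepStep_eq (order : List Int) (nb : Int) (s : PySem.Set Int) (last i : Int) :
    pvSweepStep order nb (s, last) i =
      (pvAddRange order (max (max (i - nb) (last + 1)) 0)
        (min (i + nb) ((order.length : Int) - 1)) s,
       max last (min (i + nb) ((order.length : Int) - 1))) := rfl

-- the sweep invariant: every already-covered position's element is in s
theorem mem_foldl_pvSweepStep (order : List Int) (nb : Int) (idxs : List Int)
    (s : PySem.Set Int) (last : Int)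
    (hsort : idxs.Pairwise (· ≤ ·))
    (hinv : ∀ i ∈ idxs, ∀ j, max 0 (i - nb) ≤ j → j ≤ last →
      PySem.List.pyGetD order j 0 ∈ s) (x : Int) :
    x ∈ (idxs.foldl (pvSweepStep order nb) (s, last)).1 ↔
      x ∈ s ∨ ∃ i ∈ idxs, ∃ j, max 0 (i - nb) ≤ j ∧
        j < min ((order.length : Int) - 1) (i + nb) + 1 ∧
        PySem.List.pyGetD order j 0 = x := by
  induction idxs generalizing s last with
  | nil => simp
  | cons i t ih =>
    have hhead : ∀ i' ∈ t, i ≤ i' := fun i' h' => (List.pairwise_cons.mp hsort).1 i' h'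
    rw [List.foldl_cons, pvSweepStep_eq]
    set lo := max (max (i - nb) (last + 1)) 0 with hlo
    set hi := min (i + nb) ((order.length : Int) - 1) with hhi
    have hs' : ∀ y, y ∈ pvAddRange order lo hi s ↔
        y ∈ s ∨ ∃ j, lo ≤ j ∧ j < hi + 1 ∧ PySem.List.pyGetD order j 0 = y :=
      fun y => mem_pvAddRange order lo hi s y
    rw [ih (pvAddRange order lo hi s) (max last hi) (List.pairwise_cons.mp hsort).2 ?_]
    · constructor
      · rintro (hy | hrest)
        · rw [hs'] at hy
          rcases hy with hy | ⟨j, h1, h2, h3⟩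
          · exact Or.inl hy
          · exact Or.inr ⟨i, List.mem_cons_self, j, by omega, by omega, h3⟩
        · rcases hrest with ⟨i', hi', j, h1, h2, h3⟩
          exact Or.inr ⟨i', List.mem_cons_of_mem _ hi', j, h1, h2, h3⟩
      · rintro (hy | ⟨i', hi'mem, j, h1, h2, h3⟩)
        · exact Or.inl ((hs' x).mpr (Or.inl hy))
        · rcases List.mem_cons.mp hi'mem with rfl | hmem
          · by_cases hcase : lo ≤ j
            · exact Or.inl ((hs' x).mpr (Or.inr ⟨j, hcase, by omega, h3⟩))
            · -- j below lo: j ≤ last, already in s by the invariant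
              have : PySem.List.pyGetD order j 0 ∈ s :=
                hinv i' List.mem_cons_self j h1 (by omega)
              exact Or.inl ((hs' x).mpr (Or.inl (h3 ▸ this)))
          · exact Or.inr ⟨i', hmem, j, h1, h2, h3⟩
    · -- the invariant carries to the new state
      intro i' hi'mem j hj1 hj2
      have hii' : i ≤ i' := hhead i' hi'mem
      rw [hs']
      by_cases hcase : j ≤ last
      · exact Or.inl (hinv i' (List.mem_cons_of_mem _ hi'mem) j hj1 hcase)
      · exact Or.inr ⟨j, by omega, by omega, rfl⟩

-- ===== VERDICT (by name: the statement is the Claim_ definition above) =====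
theorem with_neighbors_spec : Claim_equal_with_neighbors := by
  intro hit_pids order neighbors _
  unfold Spec_with_neighbors with_neighbors with_neighbors_alt
  by_cases hnb : neighbors ≤ 0
  · simp [hnb]
  · simp only [if_neg hnb]
    apply PySem.List.sorted_eq_sorted_of_perm _ _ _ (fun a b h => h)
    rw [List.perm_ext_iff_of_nodup
      (nodup_foldl_pvAStep _ _ _ _ _ (by simp [PySem.Set.empty]))
      (nodup_foldl_pvSweepStep _ _ _ _ _ (by simp [PySem.Set.empty]))]
    intro x
    rw [mem_foldl_pvAStep, mem_foldl_pvSweepStep _ _ _ _ _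
      (PySem.List.sorted_pairwise _ _) (fun _ _ j hj1 hj2 => absurd (le_trans hj1 hj2) (by omega))]
    simp only [PySem.Set.empty, List.not_mem_nil, false_or]
    constructor
    · rintro ⟨p, hp, i, hi, j, h1, h2, h3⟩
      refine ⟨i, ?_, j, h1, h2, h3⟩
      rw [(PySem.List.sorted_perm _ _ _).mem_iff]
      unfold pvHitIdxs
      rw [mem_pvHitIdxs_fold]
      exact Or.inr ⟨p, hp, hi⟩
    · rintro ⟨i, hi, j, h1, h2, h3⟩
      rw [(PySem.List.sorted_perm _ _ _).mem_iff] at hi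
      unfold pvHitIdxs at hi
      rw [mem_pvHitIdxs_fold] at hi
      rcases hi with hi | ⟨p, hp, hpi⟩
      · exact absurd hi (by simp [PySem.Set.empty])
      · exact ⟨p, hp, i, hpi, j, h1, h2, h3⟩
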